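-- pv_equiv track=rewrite | github.com/SvenAnton/py_basics | pr04_adding/adding.py | add_list_elements
-- ===== SOURCE A (Python) =====
-- def get_max_element(int_list):
--     """
--     Return the maximum element in the list.
--
--     If the list is empty return None.
--     :param int_list: List of integers
--     :return: largest int
--     """
--     return max(int_list)
--
-- def get_min_element(int_list):
--     """
--     Return the minimum element in list.
--
--     If the list is empty return None.
--     :param int_list: List of integers
--     :return: Smallest int
--     """
--     return min(int_list)
--
-- def sort_list(int_list):
--     """
--     Sort the list in descending order.
--
--     :param int_list: List of integers
--     :return: Sorted list of integers
--     """
--     int_list.sort(reverse = True)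
--     return int_list
--
-- def add_list_elements(int_list):
--     """
--     Create a new sorted list of the sums of minimum and maximum elements.
--
--     Add together the minimum and maximum element of int_list and add that sum to a new list
--     Repeat the process until all elements in the list are used, ignore the median number
--     if the list contains uneven amount of elements.
--     Sort the new list in descending order.
--     This function must use get_min_element(), get_max_element() and sort_list() functions.
--     :param int_list: List of integers
--     :return: Integer list of sums sorted in descending order.
--     """
--     iterations = len(int_list) // 2
--     new_list = []
--
--     for i in range(iterations):
--         sum = get_max_element(int_list) + get_min_element(int_list)
--         new_list.append(sum)
--         int_list.remove(get_max_element(int_list))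
--         int_list.remove(get_min_element(int_list))
--     return sort_list(new_list)
-- ===== SOURCE B (Python) =====
-- def add_list_elements(int_list):
--     # Sort once, pair i-th smallest with i-th largest; O(n log n) instead of A's O(n^2).
--     # Unlike A, this does not mutate int_list; the return value is identical.
--     s = sorted(int_list)
--     sums = [x + y for x, y in zip(s, reversed(s))][:len(s) // 2]
--     sums.sort(reverse=True)
--     return sums
-- ===== Notes on version B (the rewrite author's own statement) =====
-- stated objective: faster
-- what changed: Replaces the repeated max/min scans with remove() on a shrinking list by a single ascending sort followed by pairing each i-th smallest with the i-th largest via zip with the reversed list, then one final sort.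
import Mathlib
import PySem

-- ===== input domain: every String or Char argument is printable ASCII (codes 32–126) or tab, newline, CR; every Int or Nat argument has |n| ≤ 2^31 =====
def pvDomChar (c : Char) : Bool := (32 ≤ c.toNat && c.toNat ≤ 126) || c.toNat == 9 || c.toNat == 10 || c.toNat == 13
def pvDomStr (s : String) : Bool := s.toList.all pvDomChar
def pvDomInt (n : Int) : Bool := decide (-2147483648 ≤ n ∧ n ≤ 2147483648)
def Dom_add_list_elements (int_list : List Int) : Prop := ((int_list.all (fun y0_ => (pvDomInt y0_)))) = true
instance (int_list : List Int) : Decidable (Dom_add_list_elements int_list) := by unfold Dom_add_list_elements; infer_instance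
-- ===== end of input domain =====

-- B replaces A's repeated max/min scans on a shrinking list by one ascending sort
-- zipped with its reverse (O(n log n) vs O(n^2)); equivalence is about the RETURN
-- value only: A mutates its argument (remove/sort in place), B does not.


-- ===== PORT A =====
-- one loop iteration of A: sum = max + min; append; remove max; remove min (min recomputed
-- on the list after the first removal, exactly as Python does). The `none` branches are
-- unreachable (the loop runs len//2 times, so the list always has ≥ 2 elements and the
-- removed values are members); Python would raise there, this port returns the state unchanged.
def addStep (st : List Int × List Int) : List Int × List Int :=
  match PySem.List.max? st.1 (fun x => x), PySem.List.min? st.1 (fun x => x) with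
  | some mx, some mn =>
      let nl := st.2 ++ [mx + mn]
      match PySem.List.remove? st.1 mx with
      | none => (st.1, nl)
      | some l1 =>
          match PySem.List.min? l1 (fun x => x) with
          | none => (l1, nl)
          | some mn2 =>
              match PySem.List.remove? l1 mn2 with
              | none => (l1, nl)
              | some l2 => (l2, nl)
  | _, _ => st

def add_list_elements (int_list : List Int) : List Int :=
  let iterations : Int := PySem.Int.floordiv (int_list.length : Int) 2
  let res := (PySem.List.pyRange 0 iterations 1).foldl (fun st _ => addStep st) (int_list, ([] : List Int))
  PySem.List.sorted res.2 (fun x => x) true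

-- ===== PORT B =====
def add_list_elements_alt (int_list : List Int) : List Int :=
  let s := PySem.List.sorted int_list (fun x => x) false
  let sums := ((s.zip s.reverse).map (fun p => p.1 + p.2)).take (s.length / 2)
  PySem.List.sorted sums (fun x => x) true

-- ===== PRECONDITION & SPEC =====
def Spec_add_list_elements (int_list : List Int) (out : List Int) : Prop := out = add_list_elements_alt int_list
instance (int_list : List Int) (out : List Int) : Decidable (Spec_add_list_elements int_list out) := by unfold Spec_add_list_elements; infer_instance

-- ===== CLAIM (what is proved, stated in full; the proofs are below) =====
def Claim_equal_add_list_elements : Prop := ∀ (int_list : List Int), Dom_add_list_elements int_list → Spec_add_list_elements int_list (add_list_elements int_list)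

-- ===== LEMMAS AND PROOFS =====

-- a fold whose function ignores the elements is an iterate
theorem foldl_ignore {α β : Type} (f : α → α) (init : α) (l : List β) :
    l.foldl (fun st _ => f st) init = f^[l.length] init := by
  induction l generalizing init with
  | nil => rfl
  | cons x t ih => simp [List.foldl_cons, ih, Function.iterate_succ_apply]

-- the sorted form of a list with ≥ 2 elements is min :: mid ++ [max]
theorem sorted_struct (cur : List Int) (mx mn : Int)
    (hmx : PySem.List.max? cur (fun x => x) = some mx)
    (hmn : PySem.List.min? cur (fun x => x) = some mn)
    (hlen : 2 ≤ cur.length) :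
    ∃ mid, PySem.List.sorted cur (fun x => x) false = mn :: mid ++ [mx] := by
  set s := PySem.List.sorted cur (fun x => x) false with hs
  have hperm : s.Perm cur := PySem.List.sorted_perm ..
  have hlens : 2 ≤ s.length := by rwa [hperm.length_eq]
  have hsne : s ≠ [] := by intro h; rw [h] at hlens; simp at hlens
  obtain ⟨a, t, hst⟩ := List.exists_cons_of_ne_nil hsne
  have ht : t ≠ [] := by
    intro h; rw [hst, h] at hlens; simp at hlens
  obtain ⟨mid, b, htb⟩ := (List.eq_nil_or_concat t).resolve_left ht
  have hsab : s = a :: mid ++ [b] := by rw [hst, htb]; simp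
  have hpw : s.Pairwise (fun x y => x ≤ y) := by
    have := PySem.List.sorted_pairwise cur (fun x => x)
    simpa [hs] using this
  -- a = mn
  have ha_mem : a ∈ cur := hperm.mem_iff.mp (by rw [hst]; exact List.mem_cons_self ..)
  have hmn_mem : mn ∈ cur := PySem.List.min?_mem hmn
  have hmn_s : mn ∈ s := hperm.mem_iff.mpr hmn_mem
  have ha_le : ∀ y ∈ s, a ≤ y := by
    intro y hy
    rw [hst] at hy hpw
    rcases List.mem_cons.mp hy with h | h
    · subst h; exact le_refl _
    · exact (List.pairwise_cons.mp hpw).1 y h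
  have hamn : a = mn := le_antisymm (ha_le mn hmn_s) (PySem.List.min?_isMin hmn a ha_mem)
  -- b = mx
  have hb_mem : b ∈ cur := hperm.mem_iff.mp (by rw [hsab]; simp)
  have hmx_mem : mx ∈ cur := PySem.List.max?_mem hmx
  have hmx_s : mx ∈ s := hperm.mem_iff.mpr hmx_mem
  have hle_b : ∀ y ∈ s, y ≤ b := by
    intro y hy
    rw [hsab] at hy hpw
    have := (List.pairwise_append.mp hpw).2.2
    rcases List.mem_append.mp hy with h | h
    · exact this y h b (List.mem_singleton_self _)
    · simp at h; omega
  have hbmx : b = mx := le_antisymm (PySem.List.max?_isMax hmx b hb_mem) (hle_b mx hmx_s)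
  exact ⟨mid, by rw [hsab, hamn, hbmx]⟩

-- the pair sums of B, as a named helper for the proofs
def pairSums (s : List Int) : List Int := (s.zip s.reverse).map (fun p => p.1 + p.2)

-- main loop invariant: k iterations of A's step append the first k pair sums of the sorted list
theorem loop_eq : ∀ (k : Nat) (cur acc : List Int), 2 * k ≤ cur.length →
    (addStep^[k] (cur, acc)).2
      = acc ++ (pairSums (PySem.List.sorted cur (fun x => x) false)).take k := by
  intro k
  induction k with
  | zero => intro cur acc _; simp
  | succ k ih =>
    intro cur acc hlen
    have hne : cur ≠ [] := by intro h; rw [h] at hlen; simp at hlen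
    obtain ⟨mx, hmx⟩ : ∃ mx, PySem.List.max? cur (fun x => x) = some mx := by
      cases h : PySem.List.max? cur (fun x => x) with
      | none => exact absurd ((PySem.List.max?_eq_none_iff _ _).mp h) hne
      | some mx => exact ⟨mx, rfl⟩
    obtain ⟨mn, hmn⟩ : ∃ mn, PySem.List.min? cur (fun x => x) = some mn := by
      cases h : PySem.List.min? cur (fun x => x) with
      | none => exact absurd ((PySem.List.min?_eq_none_iff _ _).mp h) hne
      | some mn => exact ⟨mn, rfl⟩
    obtain ⟨mid, hsort⟩ := sorted_struct cur mx mn hmx hmn (by omega)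
    set s := PySem.List.sorted cur (fun x => x) false with hs
    have hperm : s.Perm cur := PySem.List.sorted_perm ..
    have hlen_mid : s.length = mid.length + 2 := by rw [hsort]; simp
    -- first removal
    have hmx_mem : mx ∈ cur := PySem.List.max?_mem hmx
    have hrm1 : PySem.List.remove? cur mx = some (cur.erase mx) :=
      PySem.List.remove?_eq_some_erase cur mx hmx_mem
    have hperm1 : (cur.erase mx).Perm (mn :: mid) := by
      have h1 : (cur.erase mx).Perm (s.erase mx) := (hperm.erase mx).symm
      have h2 : (s.erase mx).Perm (mn :: mid) := by
        rw [hsort]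
        have hp : (((mn :: mid) ++ [mx]).erase mx).Perm ((mx :: (mn :: mid)).erase mx) :=
          (List.perm_append_singleton ..).erase mx
        simpa [List.erase_cons_head] using hp
      exact h1.trans h2
    -- recomputed min
    have hmn_mem1 : mn ∈ cur.erase mx := hperm1.mem_iff.mpr (List.mem_cons_self ..)
    obtain ⟨mn2, hmn2⟩ : ∃ v, PySem.List.min? (cur.erase mx) (fun x => x) = some v := by
      cases h : PySem.List.min? (cur.erase mx) (fun x => x) with
      | none =>
        exact absurd (by rw [(PySem.List.min?_eq_none_iff _ _).mp h] at hmn_mem1; exact hmn_mem1)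
          (by simp)
      | some v => exact ⟨v, rfl⟩
    have hmn2_eq : mn2 = mn := by
      have h1 : mn2 ≤ mn := PySem.List.min?_isMin hmn2 mn hmn_mem1
      have h2 : mn ≤ mn2 := by
        have hm : mn2 ∈ cur := List.mem_of_mem_erase (PySem.List.min?_mem hmn2)
        exact PySem.List.min?_isMin hmn mn2 hm
      omega
    -- second removal
    have hrm2 : PySem.List.remove? (cur.erase mx) mn2 = some ((cur.erase mx).erase mn2) :=
      PySem.List.remove?_eq_some_erase (cur.erase mx) mn2 (hmn2_eq ▸ hmn_mem1)
    have hperm2 : ((cur.erase mx).erase mn2).Perm mid := by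
      rw [hmn2_eq]
      have := hperm1.erase mn
      simpa [List.erase_cons_head] using this
    -- one unfolded step
    have hstep : addStep (cur, acc) = ((cur.erase mx).erase mn2, acc ++ [mx + mn]) := by
      simp [addStep, hmx, hmn, hrm1, hmn2, hrm2]
    -- sorted of the new list is mid
    have hpw_mid : mid.Pairwise (fun x y : Int => x ≤ y) := by
      have hpw : s.Pairwise (fun x y : Int => x ≤ y) := by
        have := PySem.List.sorted_pairwise cur (fun x => x)
        simpa [hs] using this
      rw [hsort] at hpw
      exact ((List.pairwise_cons.mp hpw).2.sublist (List.sublist_append_left ..))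
    have hsort' : PySem.List.sorted ((cur.erase mx).erase mn2) (fun x => x) false = mid := by
      rw [PySem.List.sorted_eq_sorted_of_perm _ _ _ (fun a b h => h) hperm2]
      exact PySem.List.sorted_eq_self_of_pairwise _ _ hpw_mid
    -- pair-sum decomposition
    have hcl : s.length = cur.length := hperm.length_eq
    have hzip : pairSums s = (mn + mx) :: (pairSums mid ++ [mx + mn]) := by
      rw [pairSums, hsort]
      have hr : (mn :: mid ++ [mx]).reverse = mx :: (mid.reverse ++ [mn]) := by simp
      rw [hr]
      show ((mn :: (mid ++ [mx])).zip (mx :: (mid.reverse ++ [mn]))).map _ = _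
      rw [List.zip_cons_cons, List.zip_append (by simp)]
      simp [pairSums]
    have htake : (pairSums s).take (k + 1) = (mn + mx) :: (pairSums mid).take k := by
      rw [hzip, List.take_succ_cons, List.take_append_of_le_length]
      have h1 : (pairSums mid).length = mid.length := by simp [pairSums]
      omega
    -- assemble
    rw [Function.iterate_succ_apply, hstep,
      ih ((cur.erase mx).erase mn2) (acc ++ [mx + mn])
        (by rw [hperm2.length_eq]; omega),
      hsort', htake]
    simp [Int.add_comm mx mn]

-- ===== VERDICT (by name: the statement is the Claim_ definition above) =====
theorem add_list_elements_spec : Claim_equal_add_list_elements := by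
  intro int_list _
  show PySem.List.sorted
      (((PySem.List.pyRange 0 (PySem.Int.floordiv (int_list.length : Int) 2) 1).foldl
        (fun st _ => addStep st) (int_list, ([] : List Int))).2) (fun x => x) true
    = PySem.List.sorted
      ((((PySem.List.sorted int_list (fun x => x) false).zip
          (PySem.List.sorted int_list (fun x => x) false).reverse).map
          (fun p => p.1 + p.2)).take ((PySem.List.sorted int_list (fun x => x) false).length / 2))
      (fun x => x) true
  have hiter : PySem.Int.floordiv (int_list.length : Int) 2 = ((int_list.length / 2 : Nat) : Int) := by
    exact_mod_cast PySem.Int.floordiv_natCast int_list.length 2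
  rw [hiter, foldl_ignore, PySem.List.length_pyRange_one]
  have hlen : ((((int_list.length / 2 : Nat) : Int) - 0).toNat) = int_list.length / 2 := by
    omega
  rw [hlen, loop_eq (int_list.length / 2) int_list [] (by omega)]
  have hslen : (PySem.List.sorted int_list (fun x => x) false).length = int_list.length :=
    PySem.List.length_sorted ..
  simp [pairSums, hslen]
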